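-- pv_equiv track=rewrite | github.com/soulmaten7/potal | scripts/benchmark_hybrid_v5.py | build_chapter_index
-- ===== SOURCE A (Python) =====
-- from collections import Counter, defaultdict
--
-- def build_chapter_index(entries):
--     """Group entries by chapter, with heading-level summaries."""
--     chapters = defaultdict(list)
--     for e in entries:
--         chapters[e["code"][:2]].append(e)
--
--     # Build chapter summaries: chapter → list of headings with descriptions
--     ch_summaries = {}
--     for ch, ch_entries in chapters.items():
--         headings = {}
--         for e in ch_entries:
--             h4 = e["code"][:4]
--             if h4 not in headings:
--                 headings[h4] = e["desc"][:100]
--         ch_summaries[ch] = headings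
--
--     return chapters, ch_summaries
-- ===== SOURCE B (Python) =====
-- from collections import defaultdict
--
-- def build_chapter_index(entries):
--     """Group entries by chapter, with heading-level summaries (dedup + filter)."""
--     order = list(dict.fromkeys(e["code"][:2] for e in entries))
--     chapters = defaultdict(list)
--     for ch in order:
--         chapters[ch] = [e for e in entries if e["code"][:2] == ch]
--     ch_summaries = {}
--     for ch in order:
--         grp = [e for e in entries if e["code"][:2] == ch]
--         headings = {}
--         for h4 in dict.fromkeys(e["code"][:4] for e in grp):
--             first = next(e for e in grp if e["code"][:4] == h4)
--             headings[h4] = first["desc"][:100]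
--         ch_summaries[ch] = headings
--     return chapters, ch_summaries
-- ===== Notes on version B (the rewrite author's own statement) =====
-- stated objective: alternative
-- what changed: B replaces A's incremental dict-building passes with a dedup-then-filter decomposition: it first computes the distinct chapter codes in first-occurrence order (dict.fromkeys), materialises each chapter group by filtering entries, and builds each summary from the distinct 4-char prefixes with a first-match scan, instead of A's append-to-defaultdict pass followed by a rescan of each group.
import Mathlib
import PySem

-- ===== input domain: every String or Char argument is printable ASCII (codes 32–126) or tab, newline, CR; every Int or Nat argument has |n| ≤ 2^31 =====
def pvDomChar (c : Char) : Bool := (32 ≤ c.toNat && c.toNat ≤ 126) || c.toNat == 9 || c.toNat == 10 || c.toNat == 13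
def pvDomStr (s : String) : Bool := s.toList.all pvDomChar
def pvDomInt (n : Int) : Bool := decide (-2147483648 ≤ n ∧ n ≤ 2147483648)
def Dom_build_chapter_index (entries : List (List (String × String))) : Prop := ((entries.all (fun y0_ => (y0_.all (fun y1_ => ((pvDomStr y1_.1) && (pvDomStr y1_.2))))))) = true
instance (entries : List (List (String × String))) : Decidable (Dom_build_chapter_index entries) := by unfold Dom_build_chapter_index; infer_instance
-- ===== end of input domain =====

-- B rebuilds the same two dicts by a dedup-then-filter decomposition instead of A's incremental passes; return values are proved identical on Pre_.

-- shared leaf helpers: both Pythons read e["code"][:2], e["code"][:4], e["desc"][:100].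
-- e[k] is first-match lookup on the association list; s[:n] for a literal n ≥ 0 is exactly `take n` on the characters.
def pvCode2 (e : List (String × String)) : String := String.ofList (((e.lookup "code").getD "").toList.take 2)
def pvCode4 (e : List (String × String)) : String := String.ofList (((e.lookup "code").getD "").toList.take 4)
def pvDesc100 (e : List (String × String)) : String := String.ofList (((e.lookup "desc").getD "").toList.take 100)

-- ===== PORT A =====
-- first loop body: chapters[e["code"][:2]].append(e)
def pvChapStep (c : PySem.Dict String (List (List (String × String)))) (e : List (String × String)) : PySem.Dict String (List (List (String × String))) :=
  c.modify (pvCode2 e) [] (· ++ [e])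
-- inner loop body of the second pass: if h4 not in headings: headings[h4] = e["desc"][:100]
def pvHeadStep (h : PySem.Dict String String) (e : List (String × String)) : PySem.Dict String String :=
  if h.contains (pvCode4 e) then h else h.insert (pvCode4 e) (pvDesc100 e)

def build_chapter_index (entries : List (List (String × String))) : (List (String × List (List (String × String)))) × (List (String × List (String × String))) :=
  let chapters := entries.foldl pvChapStep PySem.Dict.empty
  let ch_summaries := chapters.items.foldl (fun s p => s.insert p.1 (p.2.foldl pvHeadStep PySem.Dict.empty)) PySem.Dict.empty
  (chapters.items, ch_summaries.items.map (fun p => (p.1, p.2.items)))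

-- ===== PORT B =====
-- Source B: order = list(dict.fromkeys(...)) is PySem.List.dedup; each chapter/summary value is built
-- by a filter of `entries`, each heading value by a first-match scan (next(...) = List.find?;
-- the .getD "" arm is unreachable because the key comes from the group itself).
def build_chapter_index_alt (entries : List (List (String × String))) : (List (String × List (List (String × String)))) × (List (String × List (String × String))) :=
  let order := PySem.List.dedup (entries.map pvCode2)
  let chapters := order.foldl (fun d ch => d.insert ch (entries.filter (fun e => pvCode2 e == ch))) PySem.Dict.empty
  let ch_summaries := order.foldl (fun d ch =>
      let grp := entries.filter (fun e => pvCode2 e == ch)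
      let headings := (PySem.List.dedup (grp.map pvCode4)).foldl
          (fun h h4 => h.insert h4 (((grp.find? (fun e => pvCode4 e == h4)).map pvDesc100).getD "")) PySem.Dict.empty
      d.insert ch headings) PySem.Dict.empty
  (chapters.items, ch_summaries.items.map (fun p => (p.1, p.2.items)))

-- ===== PRECONDITION & SPEC =====
-- Pre_ excludes exactly the inputs on which the Python raises KeyError: an entry without "code",
-- or an entry without "desc" whose code[:4] was not already seen on an earlier entry.
def Pre_build_chapter_index (entries : List (List (String × String))) : Prop :=
  ∀ i, i < entries.length →
    ((entries.getD i []).lookup "code").isSome = true ∧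
    (((entries.getD i []).lookup "desc").isSome = true ∨
      ∃ j, j < i ∧ (((entries.getD j []).lookup "code").getD "").toList.take 4 = (((entries.getD i []).lookup "code").getD "").toList.take 4)
instance (entries : List (List (String × String))) : Decidable (Pre_build_chapter_index entries) := by unfold Pre_build_chapter_index; infer_instance

def pvWitness_build_chapter_index : (List (List (String × String))) := [[("code", "A101"), ("desc", "Animals")], [("code", "A101")], [("code", "B201"), ("desc", "Plants")]]

def Spec_build_chapter_index (entries : List (List (String × String))) (out : (List (String × List (List (String × String)))) × (List (String × List (String × String)))) : Prop := out = build_chapter_index_alt entries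
instance (entries : List (List (String × String))) (out : (List (String × List (List (String × String)))) × (List (String × List (String × String)))) : Decidable (Spec_build_chapter_index entries out) := by unfold Spec_build_chapter_index; infer_instance

-- ===== CLAIM (what is proved, stated in full; the proofs are below) =====
def Claim_equal_build_chapter_index : Prop := ∀ (entries : List (List (String × String))), Dom_build_chapter_index entries → Pre_build_chapter_index entries → Spec_build_chapter_index entries (build_chapter_index entries)

-- ===== LEMMAS AND PROOFS =====

-- keys of A's insert-if-absent heading fold grow as Python-set insertion
theorem pvHead_keys (l : List (List (String × String))) (d : PySem.Dict String String) :
    (l.foldl pvHeadStep d).keys = PySem.Set.update d.keys (l.map pvCode4) := by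
  induction l generalizing d with
  | nil => rfl
  | cons e l ih =>
    simp only [List.foldl_cons, List.map_cons, pvHeadStep]
    by_cases hc : d.contains (pvCode4 e) = true
    · rw [if_pos hc, ih]
      have hadd : PySem.Set.add d.keys (pvCode4 e) = d.keys := by
        have hm : pvCode4 e ∈ d.keys := (PySem.Dict.contains_iff_mem_keys d _).mp hc
        simp [PySem.Set.add, PySem.Set.contains, hm]
      simp [PySem.Set.update, List.foldl_cons, hadd]
    · rw [if_neg hc, ih,
        PySem.Dict.keys_insert_of_not_contains d (pvDesc100 e) (by simpa using hc)]
      have hadd : PySem.Set.add d.keys (pvCode4 e) = d.keys ++ [pvCode4 e] := by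
        have hm : pvCode4 e ∉ d.keys := fun hm => hc ((PySem.Dict.contains_iff_mem_keys d _).mpr hm)
        simp [PySem.Set.add, PySem.Set.contains, hm]
      simp [PySem.Set.update, List.foldl_cons, hadd]

-- lookups in A's insert-if-absent heading fold: existing keys keep their value, new keys get the first match
theorem pvHead_get? (l : List (List (String × String))) (d : PySem.Dict String String) (x : String) :
    (l.foldl pvHeadStep d).get? x =
      match d.get? x with
      | some w => some w
      | none => (l.find? (fun e => pvCode4 e == x)).map pvDesc100 := by
  induction l generalizing d with
  | nil => cases h : d.get? x <;> simp [h]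
  | cons e l ih =>
    simp only [List.foldl_cons, pvHeadStep]
    by_cases hc : d.contains (pvCode4 e) = true
    · rw [if_pos hc, ih]
      cases hdx : d.get? x with
      | some w => simp
      | none =>
        have hne : (pvCode4 e == x) = false := by
          refine beq_eq_false_iff_ne.mpr ?_
          intro h
          rw [PySem.Dict.contains_eq_isSome_get?, h, hdx] at hc; simp at hc
        simp [hne]
    · rw [if_neg hc, ih]
      have hcf : d.contains (pvCode4 e) = false := by simpa using hc
      by_cases hx : x = pvCode4 e
      · rw [hx, PySem.Dict.get?_insert_self]
        have hdn : d.get? (pvCode4 e) = none := by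
          rw [PySem.Dict.contains_eq_isSome_get?] at hcf
          simpa using hcf
        simp [hdn]
      · rw [PySem.Dict.get?_insert_of_ne d (pvDesc100 e) hx]
        cases hdx : d.get? x with
        | some w => simp
        | none =>
          have hne : (pvCode4 e == x) = false := beq_eq_false_iff_ne.mpr (Ne.symm hx)
          simp [hne]

-- A's heading fold over any group equals B's dedup-then-first-match table
theorem pvHead_items (g : List (List (String × String))) :
    (g.foldl pvHeadStep PySem.Dict.empty).items =
      (PySem.List.dedup (g.map pvCode4)).map
        (fun h4 => (h4, ((g.find? (fun e => pvCode4 e == h4)).map pvDesc100).getD "")) := by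
  have hkeys : (g.foldl pvHeadStep PySem.Dict.empty).keys = PySem.List.dedup (g.map pvCode4) := by
    rw [pvHead_keys]
    simp [PySem.Set.update, PySem.Dict.keys_empty, PySem.List.dedup_eq_ofList, PySem.Set.ofList_eq_foldl]
  have hnd : (g.foldl pvHeadStep PySem.Dict.empty).keys.Nodup := by
    rw [hkeys]; exact PySem.List.nodup_dedup _
  rw [PySem.Dict.items_eq_map_keys _ hnd "", hkeys]
  apply List.map_congr_left
  intro x _
  rw [PySem.Dict.getD_eq_get?_getD, pvHead_get?]
  simp [PySem.Dict.get?_empty]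

theorem build_chapter_index_spec : Claim_equal_build_chapter_index := by
  intro entries _ _
  unfold Spec_build_chapter_index build_chapter_index build_chapter_index_alt
  dsimp only
  -- A's chapters dict, characterised
  have hAkeys : (entries.foldl pvChapStep PySem.Dict.empty).keys = PySem.List.dedup (entries.map pvCode2) := by
    have := PySem.Dict.keys_foldl_modify_key entries pvCode2 [] (fun _ e => (· ++ [e])) (PySem.Dict.empty)
    simpa [pvChapStep, PySem.Dict.keys_empty, PySem.Set.update, PySem.List.dedup_eq_ofList,
      PySem.Set.ofList_eq_foldl] using this
  have hAnd : (entries.foldl pvChapStep PySem.Dict.empty).keys.Nodup := by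
    rw [hAkeys]; exact PySem.List.nodup_dedup _
  have hAgetD : ∀ c, (entries.foldl pvChapStep PySem.Dict.empty).getD c [] =
      entries.filter (fun e => pvCode2 e == c) := by
    intro c
    have h1 : entries.foldl pvChapStep PySem.Dict.empty =
        (entries.map (fun e => (pvCode2 e, e))).foldl (fun d p => d.modify p.1 [] (· ++ [p.2])) PySem.Dict.empty := by
      rw [List.foldl_map]; rfl
    rw [h1, PySem.Dict.getD_foldl_modify_append]
    simp [PySem.Dict.getD_empty, List.filter_map, Function.comp_def]
  have hAitems : (entries.foldl pvChapStep PySem.Dict.empty).items =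
      (PySem.List.dedup (entries.map pvCode2)).map
        (fun ch => (ch, entries.filter (fun e => pvCode2 e == ch))) := by
    rw [PySem.Dict.items_eq_map_keys _ hAnd [], hAkeys]
    exact List.map_congr_left (fun x _ => by rw [hAgetD])
  -- B's two outer folds insert fresh distinct keys, so their items are plain maps over `order`
  have hfresh : ∀ {ν : Type} (v : String → ν),
      ((PySem.List.dedup (entries.map pvCode2)).foldl (fun d ch => d.insert ch (v ch)) (PySem.Dict.empty)).items
        = (PySem.List.dedup (entries.map pvCode2)).map (fun ch => (ch, v ch)) := by
    intro ν v
    have := PySem.Dict.items_foldl_insert_fresh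
      (l := PySem.List.dedup (entries.map pvCode2)) (k := fun ch => ch) (v := v)
      (d := PySem.Dict.empty)
      (by intro a _; simp [PySem.Dict.contains_empty])
      (by simpa using PySem.List.nodup_dedup (entries.map pvCode2))
    simpa [PySem.Dict.items] using this
  -- A's summaries fold likewise inserts the (distinct) chapter keys freshly
  have hAsum : ((entries.foldl pvChapStep PySem.Dict.empty).items.foldl
        (fun s p => s.insert p.1 (p.2.foldl pvHeadStep PySem.Dict.empty)) PySem.Dict.empty).items =
      (entries.foldl pvChapStep PySem.Dict.empty).items.map
        (fun p => (p.1, p.2.foldl pvHeadStep PySem.Dict.empty)) := by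
    have := PySem.Dict.items_foldl_insert_fresh
      (l := (entries.foldl pvChapStep PySem.Dict.empty).items)
      (k := fun p => p.1) (v := fun p => p.2.foldl pvHeadStep PySem.Dict.empty)
      (d := PySem.Dict.empty)
      (by intro a _; simp [PySem.Dict.contains_empty])
      (by simpa [PySem.Dict.keys] using hAnd)
    simpa [PySem.Dict.items] using this
  refine Prod.ext ?_ ?_ <;> dsimp only
  · rw [hfresh, hAitems]
  · rw [hAsum, hfresh, hAitems]
    simp only [List.map_map, Function.comp_def]
    apply List.map_congr_left
    intro ch _
    have hin : (List.foldl
          (fun h h4 => h.insert h4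
            ((((entries.filter (fun e => pvCode2 e == ch)).find? (fun e => pvCode4 e == h4)).map pvDesc100).getD ""))
          PySem.Dict.empty
          (PySem.List.dedup ((entries.filter (fun e => pvCode2 e == ch)).map pvCode4))).items =
        (PySem.List.dedup ((entries.filter (fun e => pvCode2 e == ch)).map pvCode4)).map
          (fun h4 => (h4, (((entries.filter (fun e => pvCode2 e == ch)).find? (fun e => pvCode4 e == h4)).map pvDesc100).getD "")) := by
      simpa using PySem.Dict.items_foldl_insert_fresh
        (PySem.List.dedup ((entries.filter (fun e => pvCode2 e == ch)).map pvCode4)) (fun h4 => h4)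
        (fun h4 => (((entries.filter (fun e => pvCode2 e == ch)).find? (fun e => pvCode4 e == h4)).map pvDesc100).getD "")
        PySem.Dict.empty (by intro a _; simp [PySem.Dict.contains_empty])
        (by simpa using PySem.List.nodup_dedup ((entries.filter (fun e => pvCode2 e == ch)).map pvCode4))
    rw [pvHead_items, hin]
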